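-- pv_equiv track=rewrite | github.com/0z-cryptik/python_DSA_prep | exercises/exercise13.py | check_odd_product
-- ===== SOURCE A (Python) =====
-- def check_odd_product(data):
--     for i in data:
--         if not isinstance(i, int):
--             raise TypeError('values must be an integer')
--     for j in data:
--         for k in data:
--             if (k * j) % 2 != 0:
--                 return True
--     return False
-- ===== SOURCE B (Python) =====
-- def check_odd_product(data):
--     for i in data:
--         if not isinstance(i, int):
--             raise TypeError('values must be an integer')
--     for x in data:
--         if x % 2 != 0:
--             return True
--     return False
-- ===== Notes on version B (the rewrite author's own statement) =====
-- stated objective: faster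
-- what changed: A product of two list elements is odd iff some element is odd (that element times itself), so B replaces A's nested pair scan with a single any-odd pass.
import Mathlib
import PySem

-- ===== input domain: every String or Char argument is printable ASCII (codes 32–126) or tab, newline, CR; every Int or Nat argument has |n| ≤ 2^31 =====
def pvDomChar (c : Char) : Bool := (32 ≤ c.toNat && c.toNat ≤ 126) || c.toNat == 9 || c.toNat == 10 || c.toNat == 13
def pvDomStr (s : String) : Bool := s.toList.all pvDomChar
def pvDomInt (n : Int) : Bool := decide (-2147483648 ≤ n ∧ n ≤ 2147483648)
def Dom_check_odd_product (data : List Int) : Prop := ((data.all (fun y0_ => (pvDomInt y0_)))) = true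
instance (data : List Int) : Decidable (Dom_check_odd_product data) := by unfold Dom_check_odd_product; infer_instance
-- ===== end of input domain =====

-- B replaces A's nested pair scan with a single any-odd pass (a product is odd iff some element is odd).
-- ===== PORT A =====
-- inner loop: for k in data: if (k * j) % 2 != 0: return True
def pvInnerA (j : Int) : List Int → Bool
  | [] => false
  | k :: rest => if PySem.Int.mod (k * j) 2 ≠ 0 then true else pvInnerA j rest

-- outer loop: for j in data: …  (inner scans the full list)
def pvOuterA (full : List Int) : List Int → Bool
  | [] => false
  | j :: rest => if pvInnerA j full then true else pvOuterA full rest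

def check_odd_product (data : List Int) : Bool := pvOuterA data data

-- ===== PORT B =====
-- single pass: for x in data: if x % 2 != 0: return True
def check_odd_product_alt : List Int → Bool
  | [] => false
  | x :: rest => if PySem.Int.mod x 2 ≠ 0 then true else check_odd_product_alt rest

-- ===== PRECONDITION & SPEC =====
def Spec_check_odd_product (data : List Int) (out : Bool) : Prop := out = check_odd_product_alt data
instance (data : List Int) (out : Bool) : Decidable (Spec_check_odd_product data out) := by unfold Spec_check_odd_product; infer_instance

-- ===== CLAIM (what is proved, stated in full; the proofs are below) =====
def Claim_equal_check_odd_product : Prop := ∀ (data : List Int), Dom_check_odd_product data → Spec_check_odd_product data (check_odd_product data)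

-- ===== LEMMAS AND PROOFS =====

lemma pvInnerA_eq (j : Int) (l : List Int) :
    pvInnerA j l = l.any (fun k => decide (PySem.Int.mod (k * j) 2 ≠ 0)) := by
  induction l with
  | nil => rfl
  | cons k rest ih =>
    rw [pvInnerA, List.any_cons, ih]
    split_ifs with h
    · rw [decide_eq_true h, Bool.true_or]
    · rw [decide_eq_false h, Bool.false_or]

lemma pvOuterA_eq (full l : List Int) :
    pvOuterA full l = l.any (fun j => pvInnerA j full) := by
  induction l with
  | nil => rfl
  | cons j rest ih =>
    rw [pvOuterA, List.any_cons, ih]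
    split_ifs with h
    · rw [h, Bool.true_or]
    · rw [Bool.not_eq_true] at h
      rw [h, Bool.false_or]

lemma odd_prod_iff (k j : Int) :
    PySem.Int.mod (k * j) 2 ≠ 0 ↔ PySem.Int.mod k 2 ≠ 0 ∧ PySem.Int.mod j 2 ≠ 0 := by
  simp only [PySem.Int.mod, Int.fmod_eq_emod]
  have h2 : (k * j) % 2 = (k % 2) * (j % 2) % 2 := Int.mul_emod k j 2
  have hk : k % 2 = 0 ∨ k % 2 = 1 := by omega
  have hj : j % 2 = 0 ∨ j % 2 = 1 := by omega
  rcases hk with hk | hk <;> rcases hj with hj | hj <;>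
    simp [h2, hk, hj]

-- ===== VERDICT (by name: the statement is the Claim_ definition above) =====
lemma pvAlt_eq (l : List Int) :
    check_odd_product_alt l = l.any (fun x => decide (PySem.Int.mod x 2 ≠ 0)) := by
  induction l with
  | nil => rfl
  | cons x rest ih =>
    rw [check_odd_product_alt, List.any_cons, ih]
    split_ifs with h
    · rw [decide_eq_true h, Bool.true_or]
    · rw [decide_eq_false h, Bool.false_or]

theorem check_odd_product_spec : Claim_equal_check_odd_product := by
  intro data _
  unfold Spec_check_odd_product check_odd_product
  rw [pvOuterA_eq, pvAlt_eq, Bool.eq_iff_iff]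
  simp only [List.any_eq_true, pvInnerA_eq, decide_eq_true_eq, odd_prod_iff]
  constructor
  · rintro ⟨j, hj, k, hk, _, hoj⟩
    exact ⟨j, hj, hoj⟩
  · rintro ⟨x, hx, hox⟩
    exact ⟨x, hx, x, hx, hox, hox⟩
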